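-- pv_equiv track=rewrite | github.com/Wang-lab-UCSD/Qimai | test8_eval_reduce_FP.py | _calculate_cisbp_motif_reliability_for_prompt
-- ===== SOURCE A (Python) =====
-- from typing import TypedDict, Annotated, List, Union, Dict, Tuple
--
-- def _calculate_cisbp_motif_reliability_for_prompt(motifs_metadata: List[Dict]) -> str:
--     if not motifs_metadata: return "Not Found"
--     best_reliability_category = "Unknown"; has_direct = False; has_inferred = False; has_direct_high_source = False; has_inferred_high_source = False
--     HIGH_CONFIDENCE_SOURCES_FOR_PROMPT = ["JASPAR", "HOCOMOCO"]
--     for meta in motifs_metadata: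
--         status = meta.get('TF_Status'); source = meta.get('MSource_Identifier', '')
--         is_high_conf_source = any(hs.lower() in source.lower() for hs in HIGH_CONFIDENCE_SOURCES_FOR_PROMPT if hs)
--         if status == 'D': has_direct = True;
--         if is_high_conf_source: has_direct_high_source = True
--         elif status == 'I': has_inferred = True;
--         if is_high_conf_source: has_inferred_high_source = True
--     if has_direct_high_source: best_reliability_category = "Direct_HighConfidenceSource"
--     elif has_direct: best_reliability_category = "Direct_Standard"
--     elif has_inferred_high_source: best_reliability_category = "Inferred_HighConfidenceSource"
--     elif has_inferred: best_reliability_category = "Inferred_Standard"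
--     CISBP_RELIABILITY_DISPLAY_FOR_PROMPT = {"Direct_HighConfidenceSource": "High (Direct, Reputable Source)", "Direct_Standard": "High (Direct)", "Inferred_HighConfidenceSource": "Moderate (Inferred, Good Source)", "Inferred_Standard": "Moderate (Inferred)", "Unknown": "Unknown", "Not_Found": "Not Found"}
--     return CISBP_RELIABILITY_DISPLAY_FOR_PROMPT.get(best_reliability_category, "Unknown")
-- ===== SOURCE B (Python) =====
-- def _calculate_cisbp_motif_reliability_for_prompt(motifs_metadata):
--     if not motifs_metadata:
--         return "Not Found"
--     if any(hs in meta.get('MSource_Identifier', '').lower()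
--            for meta in motifs_metadata for hs in ("jaspar", "hocomoco")):
--         return "High (Direct, Reputable Source)"
--     if any(meta.get('TF_Status') == 'D' for meta in motifs_metadata):
--         return "High (Direct)"
--     if any(meta.get('TF_Status') == 'I' for meta in motifs_metadata):
--         return "Moderate (Inferred)"
--     return "Unknown"
-- ===== Notes on version B (the rewrite author's own statement) =====
-- stated objective: simpler
-- what changed: Replaced A's single loop that accumulates four flags (one of which, has_inferred_high_source, is redundant) plus a category string and a display-dict lookup by a cascade of three short-circuiting any() scans with early returns.
import Mathlib
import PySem

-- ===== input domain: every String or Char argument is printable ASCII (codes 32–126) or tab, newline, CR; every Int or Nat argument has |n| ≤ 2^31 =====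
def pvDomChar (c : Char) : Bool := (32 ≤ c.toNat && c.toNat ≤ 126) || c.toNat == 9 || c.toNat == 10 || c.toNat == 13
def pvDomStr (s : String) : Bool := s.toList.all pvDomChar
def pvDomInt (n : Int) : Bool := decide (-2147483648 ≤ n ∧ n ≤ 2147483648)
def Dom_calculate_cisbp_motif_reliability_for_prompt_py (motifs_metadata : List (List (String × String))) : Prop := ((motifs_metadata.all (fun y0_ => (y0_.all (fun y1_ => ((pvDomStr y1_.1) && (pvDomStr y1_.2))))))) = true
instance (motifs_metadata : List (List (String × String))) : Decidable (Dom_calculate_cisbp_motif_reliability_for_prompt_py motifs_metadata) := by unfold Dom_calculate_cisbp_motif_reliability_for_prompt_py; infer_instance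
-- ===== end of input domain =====

-- B replaces A's flag-accumulating loop (with its dead `has_inferred_high_source` branch
-- and the unused display of two categories) by a cascade of short-circuiting scans with
-- early returns; objective: simpler.

-- ===== PORT A =====
-- mt.get(k) on a Python dict ported as first-match lookup on the association list
def pyA_isHigh (mt : List (String × String)) : Bool :=
  let source := (List.lookup "MSource_Identifier" mt).getD ""
  ["JASPAR", "HOCOMOCO"].any (fun hs =>
    decide (hs ≠ "") && PySem.Str.isIn (PySem.Str.lower hs) (PySem.Str.lower source))

def pyA_step (st : Bool × Bool × Bool × Bool) (mt : List (String × String)) :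
    Bool × Bool × Bool × Bool :=
  let status := List.lookup "TF_Status" mt
  let is_high := pyA_isHigh mt
  let st := if status == some "D" then (true, st.2.1, st.2.2.1, st.2.2.2) else st
  let st := if is_high then (st.1, st.2.1, true, st.2.2.2)
            else if status == some "I" then (st.1, true, st.2.2.1, st.2.2.2) else st
  if is_high then (st.1, st.2.1, st.2.2.1, true) else st

def calculate_cisbp_motif_reliability_for_prompt_py (motifs_metadata : List (List (String × String))) : String :=
  if motifs_metadata = [] then "Not Found" else
  let st := motifs_metadata.foldl pyA_step (false, false, false, false)
  let best :=
    if st.2.2.1 then "Direct_HighConfidenceSource"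
    else if st.1 then "Direct_Standard"
    else if st.2.2.2 then "Inferred_HighConfidenceSource"
    else if st.2.1 then "Inferred_Standard"
    else "Unknown"
  (PySem.Dict.ofList [("Direct_HighConfidenceSource", "High (Direct, Reputable Source)"),
    ("Direct_Standard", "High (Direct)"),
    ("Inferred_HighConfidenceSource", "Moderate (Inferred, Good Source)"),
    ("Inferred_Standard", "Moderate (Inferred)"),
    ("Unknown", "Unknown"), ("Not_Found", "Not Found")]).getD best "Unknown"

-- ===== PORT B =====
def pyB_isHigh (mt : List (String × String)) : Bool :=
  let source := PySem.Str.lower ((List.lookup "MSource_Identifier" mt).getD "")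
  PySem.Str.isIn "jaspar" source || PySem.Str.isIn "hocomoco" source

def pyB_status (mt : List (String × String)) (v : String) : Bool :=
  List.lookup "TF_Status" mt == some v

def calculate_cisbp_motif_reliability_for_prompt_py_alt (motifs_metadata : List (List (String × String))) : String :=
  if motifs_metadata = [] then "Not Found"
  else if motifs_metadata.any pyB_isHigh then "High (Direct, Reputable Source)"
  else if motifs_metadata.any (fun m => pyB_status m "D") then "High (Direct)"
  else if motifs_metadata.any (fun m => pyB_status m "I") then "Moderate (Inferred)"
  else "Unknown"

-- ===== PRECONDITION & SPEC =====
def Spec_calculate_cisbp_motif_reliability_for_prompt_py (motifs_metadata : List (List (String × String))) (out : String) : Prop := out = calculate_cisbp_motif_reliability_for_prompt_py_alt motifs_metadata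
instance (motifs_metadata : List (List (String × String))) (out : String) : Decidable (Spec_calculate_cisbp_motif_reliability_for_prompt_py motifs_metadata out) := by unfold Spec_calculate_cisbp_motif_reliability_for_prompt_py; infer_instance

-- ===== CLAIM (what is proved, stated in full; the proofs are below) =====
def Claim_equal_calculate_cisbp_motif_reliability_for_prompt_py : Prop := ∀ (motifs_metadata : List (List (String × String))), Dom_calculate_cisbp_motif_reliability_for_prompt_py motifs_metadata → Spec_calculate_cisbp_motif_reliability_for_prompt_py motifs_metadata (calculate_cisbp_motif_reliability_for_prompt_py motifs_metadata)

-- ===== LEMMAS AND PROOFS =====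

-- A's per-element high-confidence-source test agrees with B's
theorem isHigh_eq (m : List (String × String)) : pyA_isHigh m = pyB_isHigh m := by
  have h1 : PySem.Chars.lower ['J', 'A', 'S', 'P', 'A', 'R'] = ['j', 'a', 's', 'p', 'a', 'r'] := by decide
  have h2 : PySem.Chars.lower ['H', 'O', 'C', 'O', 'M', 'O', 'C', 'O'] = ['h', 'o', 'c', 'o', 'm', 'o', 'c', 'o'] := by decide
  simp [pyA_isHigh, pyB_isHigh, h1, h2]

-- closed form of A's flag-accumulating loop
theorem foldA (l : List (List (String × String))) (a b c d : Bool) :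
    l.foldl pyA_step (a, b, c, d) =
      (a || l.any (fun m => pyB_status m "D"),
       b || l.any (fun m => !pyB_isHigh m && pyB_status m "I"),
       c || l.any pyB_isHigh,
       d || l.any pyB_isHigh) := by
  induction l generalizing a b c d with
  | nil => simp
  | cons x xs ih =>
    simp only [List.foldl_cons, List.any_cons]
    rw [show pyA_step (a, b, c, d) x =
        (a || pyB_status x "D",
         b || (!pyB_isHigh x && pyB_status x "I"),
         c || pyB_isHigh x,
         d || pyB_isHigh x) by
      simp only [pyA_step, pyB_status, isHigh_eq]
      cases h : pyB_isHigh x <;> cases hs : (List.lookup "TF_Status" x == some "D") <;>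
        by_cases hI : List.lookup "TF_Status" x = some "I" <;> simp [hI]]
    rw [ih]
    simp [Bool.or_assoc]

-- when no element is a high-confidence source, the !high conjunct is vacuous
theorem any_I_of_no_high (l : List (List (String × String)))
    (h : l.any pyB_isHigh = false) :
    l.any (fun m => !pyB_isHigh m && pyB_status m "I") = l.any (fun m => pyB_status m "I") := by
  induction l with
  | nil => rfl
  | cons x xs ih =>
    simp only [List.any_cons, Bool.or_eq_false_iff] at h
    simp [List.any_cons, h.1, ih h.2]

-- ===== VERDICT (by name: the statement is the Claim_ definition above) =====
theorem calculate_cisbp_motif_reliability_for_prompt_py_spec : Claim_equal_calculate_cisbp_motif_reliability_for_prompt_py := by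
  intro mm _
  show calculate_cisbp_motif_reliability_for_prompt_py mm = calculate_cisbp_motif_reliability_for_prompt_py_alt mm
  unfold calculate_cisbp_motif_reliability_for_prompt_py calculate_cisbp_motif_reliability_for_prompt_py_alt
  by_cases he : mm = []
  · simp [he]
  · simp only [he, if_false]
    rw [foldA]
    by_cases hh : mm.any pyB_isHigh = true
    · simp [hh]; decide
    · rw [Bool.not_eq_true] at hh
      rw [any_I_of_no_high mm hh]
      simp only [hh, Bool.false_or, Bool.or_false]
      by_cases hd : mm.any (fun m => pyB_status m "D") = true
      · simp [hd]; decide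
      · rw [Bool.not_eq_true] at hd
        by_cases hi : mm.any (fun m => pyB_status m "I") = true
        · simp [hd, hi]; decide
        · rw [Bool.not_eq_true] at hi
          simp [hd, hi]; decide
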